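-- pv_equiv track=rewrite | github.com/aleattene/advent-of-code | year_2024/day_04_ceres_search/solution_day_04_2024.py | create_diagonals_matrix
-- ===== SOURCE A (Python) =====
-- def create_diagonals_matrix(matrix: list[str]) -> list[str]:
--     """Create a list of all diagonals from the given matrix."""
--     rows: int = len(matrix)
--     cols: int = len(matrix[0])
--     diagonals: list[str] = []
--
--     # Helper function to add diagonals
--     def add_diagonal(start_row, start_col, delta_row, delta_col):
--         """Add a diagonal to the list of diagonals."""
--         diagonal = []
--         r, c = start_row, start_col
--         while 0 <= r < rows and 0 <= c < cols:
--             diagonal.append(matrix[r][c])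
--             r += delta_row
--             c += delta_col
--         diagonals.append("".join(diagonal))
--
--     # Diagonals from top-left to bottom-right
--     for row in range(rows):
--         add_diagonal(row, 0, 1, 1)
--     for col in range(1, cols):
--         add_diagonal(0, col, 1, 1)
--
--     # Diagonals from top-right to bottom-left
--     for col in range(cols):
--         add_diagonal(0, col, 1, -1)
--     for row in range(1, rows):
--         add_diagonal(row, cols - 1, 1, -1)
--
--     return diagonals
-- ===== SOURCE B (Python) =====
-- def create_diagonals_matrix(matrix: list[str]) -> list[str]:
--     """Create a list of all diagonals from the given matrix.
--
--     One row-major pass buckets every cell by r-c (top-left/bottom-right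
--     diagonals) and by r+c (top-right/bottom-left ones); the result is the
--     buckets joined in the original key order.
--     """
--     rows = len(matrix)
--     cols = len(matrix[0])
--     down = {}
--     anti = {}
--     for r in range(rows):
--         for c in range(cols):
--             ch = matrix[r][c]
--             down.setdefault(r - c, []).append(ch)
--             anti.setdefault(r + c, []).append(ch)
--     keys_down = list(range(rows)) + list(range(-1, -cols, -1))
--     result = ["".join(down.get(k, [])) for k in keys_down]
--     result += ["".join(anti.get(k, [])) for k in range(rows + cols - 1)]
--     return result
-- ===== Notes on version B (the rewrite author's own statement) =====
-- stated objective: alternative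
-- what changed: A walks each diagonal separately from its start cell with eight while-loop scans; B makes one row-major pass over the matrix, bucketing every cell into two dicts keyed by r-c and r+c, then joins the buckets in A's key order.
import Mathlib
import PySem

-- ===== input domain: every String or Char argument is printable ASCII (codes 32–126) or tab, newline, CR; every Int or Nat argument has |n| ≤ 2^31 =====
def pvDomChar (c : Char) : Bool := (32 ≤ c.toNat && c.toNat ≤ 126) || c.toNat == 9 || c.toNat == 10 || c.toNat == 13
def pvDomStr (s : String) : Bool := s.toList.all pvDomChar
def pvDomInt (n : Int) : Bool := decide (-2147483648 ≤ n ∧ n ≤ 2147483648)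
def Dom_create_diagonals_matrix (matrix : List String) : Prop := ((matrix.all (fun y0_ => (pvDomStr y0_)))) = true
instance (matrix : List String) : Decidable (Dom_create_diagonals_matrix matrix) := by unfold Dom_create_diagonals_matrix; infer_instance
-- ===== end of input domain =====

-- B replaces A's eight per-diagonal while-loop walks with one row-major pass that buckets
-- every cell by r-c and by r+c, then joins the buckets in A's key order (objective: alternative).

-- ===== PORT A =====
-- the character at matrix[r][c] as both ports read it
def pvCell (mat : List (List Char)) (r c : Int) : Char :=
  (PySem.List.pyGet? ((PySem.List.pyGet? mat r).getD []) c).getD ' '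

-- A's inner while loop: append matrix[r][c] while 0 <= r < rows and 0 <= c < cols, then r += dr, c += dc.
-- Fuel: r strictly increases (dr = 1 at every call site), so rows.toNat iterations always suffice.
def pvA_walk (mat : List (List Char)) (rows cols dr dc : Int) : Nat → Int → Int → List Char
  | 0, _, _ => []
  | Nat.succ n, r, c =>
    if 0 ≤ r ∧ r < rows ∧ 0 ≤ c ∧ c < cols then
      pvCell mat r c ::
        pvA_walk mat rows cols dr dc n (r + dr) (c + dc)
    else []

def create_diagonals_matrix (matrix : List String) : List String :=
  let rows : Int := matrix.length
  let cols : Int := (((PySem.List.pyGet? matrix 0).getD "").toList.length : Int)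
  let mat : List (List Char) := matrix.map String.toList
  -- add_diagonal(sr, sc, dr, dc): walk, "".join, append to diagonals
  let addDiag := fun (acc : List String) (sr sc dr dc : Int) =>
    acc ++ [String.ofList (pvA_walk mat rows cols dr dc rows.toNat sr sc)]
  let d1 := (PySem.List.pyRange 0 rows 1).foldl (fun acc row => addDiag acc row 0 1 1) []
  let d2 := (PySem.List.pyRange 1 cols 1).foldl (fun acc col => addDiag acc 0 col 1 1) d1
  let d3 := (PySem.List.pyRange 0 cols 1).foldl (fun acc col => addDiag acc 0 col 1 (-1)) d2
  (PySem.List.pyRange 1 rows 1).foldl (fun acc row => addDiag acc row (cols - 1) 1 (-1)) d3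

-- ===== PORT B =====
def create_diagonals_matrix_alt (matrix : List String) : List String :=
  let rows : Int := matrix.length
  let cols : Int := (((PySem.List.pyGet? matrix 0).getD "").toList.length : Int)
  let mat : List (List Char) := matrix.map String.toList
  -- one row-major pass: down.setdefault(r-c, []).append(ch); anti.setdefault(r+c, []).append(ch)
  let dicts :=
    (PySem.List.pyRange 0 rows 1).foldl (fun ds r =>
      (PySem.List.pyRange 0 cols 1).foldl (fun ds c =>
        (ds.1.modify (r - c) [] (fun v => v ++ [pvCell mat r c]),
         ds.2.modify (r + c) [] (fun v => v ++ [pvCell mat r c])))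
        ds)
      ((PySem.Dict.empty : PySem.Dict Int (List Char)), (PySem.Dict.empty : PySem.Dict Int (List Char)))
  let keysDown := PySem.List.pyRange 0 rows 1 ++ PySem.List.pyRange (-1) (-cols) (-1)
  keysDown.map (fun k => String.ofList (dicts.1.getD k [])) ++
    (PySem.List.pyRange 0 (rows + cols - 1) 1).map (fun k => String.ofList (dicts.2.getD k []))

-- ===== PRECONDITION & SPEC =====
-- Pre_ excludes exactly the inputs where the Python A raises IndexError: the empty matrix
-- (matrix[0]) and ragged matrices with a row shorter than row 0 (matrix[r][c] for c < cols).
def Pre_create_diagonals_matrix (matrix : List String) : Prop :=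
  matrix ≠ [] ∧ ∀ s ∈ matrix, (matrix.headD "").toList.length ≤ s.toList.length
instance (matrix : List String) : Decidable (Pre_create_diagonals_matrix matrix) := by
  unfold Pre_create_diagonals_matrix; infer_instance

def pvWitness_create_diagonals_matrix : List String := ["abc", "def"]

def Spec_create_diagonals_matrix (matrix : List String) (out : List String) : Prop := out = create_diagonals_matrix_alt matrix
instance (matrix : List String) (out : List String) : Decidable (Spec_create_diagonals_matrix matrix out) := by unfold Spec_create_diagonals_matrix; infer_instance

-- ===== CLAIM (what is proved, stated in full; the proofs are below) =====
def Claim_equal_create_diagonals_matrix : Prop := ∀ (matrix : List String), Dom_create_diagonals_matrix matrix → Pre_create_diagonals_matrix matrix → Spec_create_diagonals_matrix matrix (create_diagonals_matrix matrix)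

-- ===== LEMMAS AND PROOFS =====

-- cells of the ↘ diagonal of key k = r-c, resp. of the ↙ diagonal of key k = r+c,
-- contributed by the rows listed in rs (in that order)
def pvSegD (mat : List (List Char)) (cols k : Int) (rs : List Int) : List Char :=
  rs.flatMap (fun r => if 0 ≤ r - k ∧ r - k < cols then [pvCell mat r (r - k)] else [])

def pvSegA (mat : List (List Char)) (cols k : Int) (rs : List Int) : List Char :=
  rs.flatMap (fun r => if 0 ≤ k - r ∧ k - r < cols then [pvCell mat r (k - r)] else [])

theorem pvSegD_nil (mat : List (List Char)) (cols k : Int) (rs : List Int)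
    (h : ∀ r ∈ rs, ¬ (0 ≤ r - k ∧ r - k < cols)) : pvSegD mat cols k rs = [] := by
  simp only [pvSegD, List.flatMap_eq_nil_iff]
  intro l hl
  rw [if_neg (h l hl)]

theorem pvSegA_nil (mat : List (List Char)) (cols k : Int) (rs : List Int)
    (h : ∀ r ∈ rs, ¬ (0 ≤ k - r ∧ k - r < cols)) : pvSegA mat cols k rs = [] := by
  simp only [pvSegA, List.flatMap_eq_nil_iff]
  intro l hl
  rw [if_neg (h l hl)]

theorem pvSegD_append (mat : List (List Char)) (cols k : Int) (l1 l2 : List Int) :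
    pvSegD mat cols k (l1 ++ l2) = pvSegD mat cols k l1 ++ pvSegD mat cols k l2 := by
  simp [pvSegD]

theorem pvSegA_append (mat : List (List Char)) (cols k : Int) (l1 l2 : List Int) :
    pvSegA mat cols k (l1 ++ l2) = pvSegA mat cols k l1 ++ pvSegA mat cols k l2 := by
  simp [pvSegA]

-- A's ↘ walk from (r, r-k) reads exactly the rows r.. of diagonal k
theorem pvA_walk_down (mat : List (List Char)) (rows cols k : Int) :
    ∀ (n : Nat) (r : Int), 0 ≤ r → k ≤ r → (rows - r).toNat ≤ n →
      pvA_walk mat rows cols 1 1 n r (r - k) = pvSegD mat cols k (PySem.List.pyRange r rows 1) := by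
  intro n
  induction n with
  | zero =>
    intro r h0 hk hf
    rw [pvA_walk, PySem.List.pyRange_one_eq_nil (by omega)]
    rfl
  | succ n ih =>
    intro r h0 hk hf
    by_cases hrow : r < rows
    · rw [PySem.List.pyRange_one_cons hrow]
      by_cases hcol : r - k < cols
      · rw [pvA_walk, if_pos ⟨h0, hrow, by omega, hcol⟩, pvSegD, List.flatMap_cons,
          if_pos (by omega)]
        rw [show r - k + 1 = r + 1 - k by ring, ih (r+1) (by omega) (by omega) (by omega)]
        rfl
      · rw [pvA_walk, if_neg (by omega)]
        rw [pvSegD, List.flatMap_cons, if_neg (by omega), List.nil_append]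
        exact (pvSegD_nil mat cols k _ (fun r' hr' => by
          rw [PySem.List.mem_pyRange_one] at hr'; omega)).symm
    · rw [PySem.List.pyRange_one_eq_nil (by omega), pvA_walk, if_neg (by omega)]
      rfl

-- A's ↙ walk from (r, k-r) reads exactly the rows r.. of anti-diagonal k
theorem pvA_walk_anti (mat : List (List Char)) (rows cols k : Int) :
    ∀ (n : Nat) (r : Int), 0 ≤ r → k - cols < r → (rows - r).toNat ≤ n →
      pvA_walk mat rows cols 1 (-1) n r (k - r) = pvSegA mat cols k (PySem.List.pyRange r rows 1) := by
  intro n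
  induction n with
  | zero =>
    intro r h0 hk hf
    rw [pvA_walk, PySem.List.pyRange_one_eq_nil (by omega)]
    rfl
  | succ n ih =>
    intro r h0 hk hf
    by_cases hrow : r < rows
    · rw [PySem.List.pyRange_one_cons hrow]
      by_cases hcol : 0 ≤ k - r
      · rw [pvA_walk, if_pos ⟨h0, hrow, hcol, by omega⟩, pvSegA, List.flatMap_cons,
          if_pos (by omega)]
        rw [show k - r + -1 = k - (r + 1) by ring, ih (r+1) (by omega) (by omega) (by omega)]
        rfl
      · rw [pvA_walk, if_neg (by omega)]
        rw [pvSegA, List.flatMap_cons, if_neg (by omega), List.nil_append]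
        exact (pvSegA_nil mat cols k _ (fun r' hr' => by
          rw [PySem.List.mem_pyRange_one] at hr'; omega)).symm
    · rw [PySem.List.pyRange_one_eq_nil (by omega), pvA_walk, if_neg (by omega)]
      rfl

theorem pvRange_cast (n : Int) :
    PySem.List.pyRange 0 n 1 = (List.range n.toNat).map (fun j => Int.ofNat j) := by
  rw [PySem.List.pyRange_one]
  simp

-- filtering a range of candidate columns for the unique solution c = m
theorem pvFilter_range (N : Nat) (m : Int) (p : Int → Bool) (hp : ∀ c, p c = true ↔ c = m) :
    ((List.range N).map (fun j => Int.ofNat j)).filter p = if 0 ≤ m ∧ m < N then [m] else [] := by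
  induction N with
  | zero => rw [if_neg (by omega)]; simp
  | succ N ih =>
    rw [List.range_succ, List.map_append, List.filter_append, ih]
    simp only [Int.ofNat_eq_natCast, List.map_cons, List.map_nil, List.filter_cons,
      List.filter_nil]
    by_cases hm : m = (N : Int)
    · rw [show p (N:Int) = true from (hp _).mpr hm.symm]
      rw [if_pos rfl, if_neg (by omega), if_pos (by push_cast; omega)]
      simp [hm]
    · rw [show p (N:Int) = false by
        rw [Bool.eq_false_iff]; intro hc; exact hm ((hp _).mp hc).symm]
      simp only [Bool.false_eq_true, if_false, List.append_nil]
      by_cases h : 0 ≤ m ∧ m < (N:Int)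
      · rw [if_pos h, if_pos (by push_cast; omega)]
      · rw [if_neg h, if_neg (by push_cast at h ⊢; omega)]

theorem pvFilter_sub (n r k : Int) :
    (PySem.List.pyRange 0 n 1).filter (fun c => r - c == k)
      = if 0 ≤ r - k ∧ r - k < n then [r - k] else [] := by
  rw [pvRange_cast, pvFilter_range n.toNat (r - k) _ (by intro c; rw [beq_iff_eq]; omega)]
  by_cases h : 0 ≤ r - k ∧ r - k < n
  · rw [if_pos ⟨h.1, by omega⟩, if_pos h]
  · rw [if_neg (by omega), if_neg h]

theorem pvFilter_add (n r k : Int) :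
    (PySem.List.pyRange 0 n 1).filter (fun c => r + c == k)
      = if 0 ≤ k - r ∧ k - r < n then [k - r] else [] := by
  rw [pvRange_cast, pvFilter_range n.toNat (k - r) _ (by intro c; rw [beq_iff_eq]; omega)]
  by_cases h : 0 ≤ k - r ∧ k - r < n
  · rw [if_pos ⟨h.1, by omega⟩, if_pos h]
  · rw [if_neg (by omega), if_neg h]

-- one row of B's bucket-building pass
theorem pvRow_bucket (mat : List (List Char)) (cols : Int) (key : Int → Int → Int)
    (d : PySem.Dict Int (List Char)) (r k : Int) :
    ((PySem.List.pyRange 0 cols 1).foldl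
        (fun d c => d.modify (key r c) [] (fun v => v ++ [pvCell mat r c])) d).getD k []
      = d.getD k []
        ++ (((PySem.List.pyRange 0 cols 1).filter (fun c => key r c == k)).map (pvCell mat r)) := by
  have h1 : (PySem.List.pyRange 0 cols 1).foldl
        (fun d c => d.modify (key r c) [] (fun v => v ++ [pvCell mat r c])) d
      = ((PySem.List.pyRange 0 cols 1).map (fun c => (key r c, pvCell mat r c))).foldl
          (fun d p => d.modify p.1 [] (fun v => v ++ [p.2])) d := by
    rw [List.foldl_map]
  rw [h1, PySem.Dict.getD_foldl_modify_append, List.filter_map, List.map_map]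
  rfl

-- the whole pass: bucket k holds the per-row contributions in row order
theorem pvFold_bucket (mat : List (List Char)) (cols : Int) (key : Int → Int → Int)
    (rs : List Int) (d : PySem.Dict Int (List Char)) (k : Int) :
    ((rs.foldl (fun d r =>
        (PySem.List.pyRange 0 cols 1).foldl
          (fun d c => d.modify (key r c) [] (fun v => v ++ [pvCell mat r c])) d) d).getD k [])
      = d.getD k []
        ++ rs.flatMap (fun r =>
            ((PySem.List.pyRange 0 cols 1).filter (fun c => key r c == k)).map (pvCell mat r)) := by
  induction rs generalizing d with
  | nil => simp
  | cons r rs ih =>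
    rw [List.foldl_cons, ih, pvRow_bucket, List.flatMap_cons, List.append_assoc]

theorem pvBucketD (mat : List (List Char)) (rows cols : Int) (k : Int) :
    (((PySem.List.pyRange 0 rows 1).foldl (fun d r =>
        (PySem.List.pyRange 0 cols 1).foldl
          (fun d c => d.modify (r - c) [] (fun v => v ++ [pvCell mat r c])) d)
        (PySem.Dict.empty : PySem.Dict Int (List Char))).getD k [])
      = pvSegD mat cols k (PySem.List.pyRange 0 rows 1) := by
  rw [pvFold_bucket mat cols (fun r c => r - c), PySem.Dict.getD_empty, List.nil_append, pvSegD]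
  apply List.flatMap_congr  -- pointwise
  intro r _
  rw [pvFilter_sub]
  by_cases h : 0 ≤ r - k ∧ r - k < cols
  · rw [if_pos h, if_pos h]; rfl
  · rw [if_neg h, if_neg h]; rfl

theorem pvBucketA (mat : List (List Char)) (rows cols : Int) (k : Int) :
    (((PySem.List.pyRange 0 rows 1).foldl (fun d r =>
        (PySem.List.pyRange 0 cols 1).foldl
          (fun d c => d.modify (r + c) [] (fun v => v ++ [pvCell mat r c])) d)
        (PySem.Dict.empty : PySem.Dict Int (List Char))).getD k [])
      = pvSegA mat cols k (PySem.List.pyRange 0 rows 1) := by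
  rw [pvFold_bucket mat cols (fun r c => r + c), PySem.Dict.getD_empty, List.nil_append, pvSegA]
  apply List.flatMap_congr
  intro r _
  rw [pvFilter_add]
  by_cases h : 0 ≤ k - r ∧ k - r < cols
  · rw [if_pos h, if_pos h]; rfl
  · rw [if_neg h, if_neg h]; rfl

-- B's pair of dicts is a pair of independent single-dict folds
theorem pvDicts_split (mat : List (List Char)) (rows cols : Int) :
    ((PySem.List.pyRange 0 rows 1).foldl (fun ds (r : Int) =>
      (PySem.List.pyRange 0 cols 1).foldl (fun ds (c : Int) =>
        (ds.1.modify (r - c) [] (fun v => v ++ [pvCell mat r c]),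
         ds.2.modify (r + c) [] (fun v => v ++ [pvCell mat r c])))
        ds)
      ((PySem.Dict.empty : PySem.Dict Int (List Char)), (PySem.Dict.empty : PySem.Dict Int (List Char))))
    = ((PySem.List.pyRange 0 rows 1).foldl (fun d r =>
        (PySem.List.pyRange 0 cols 1).foldl
          (fun d c => d.modify (r - c) [] (fun v => v ++ [pvCell mat r c])) d) PySem.Dict.empty,
       (PySem.List.pyRange 0 rows 1).foldl (fun d r =>
        (PySem.List.pyRange 0 cols 1).foldl
          (fun d c => d.modify (r + c) [] (fun v => v ++ [pvCell mat r c])) d) PySem.Dict.empty) := by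
  have h := PySem.List.foldl_congr_mem
    (l := PySem.List.pyRange 0 rows 1)
    (init := ((PySem.Dict.empty : PySem.Dict Int (List Char)),
              (PySem.Dict.empty : PySem.Dict Int (List Char))))
    (f := fun ds (r : Int) =>
      (PySem.List.pyRange 0 cols 1).foldl (fun ds (c : Int) =>
        (ds.1.modify (r - c) [] (fun v => v ++ [pvCell mat r c]),
         ds.2.modify (r + c) [] (fun v => v ++ [pvCell mat r c])))
        ds)
    (g := fun ds (r : Int) =>
      ((PySem.List.pyRange 0 cols 1).foldl
          (fun d c => d.modify (r - c) [] (fun v => v ++ [pvCell mat r c])) ds.1,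
       (PySem.List.pyRange 0 cols 1).foldl
          (fun d c => d.modify (r + c) [] (fun v => v ++ [pvCell mat r c])) ds.2))
    (by intro acc r _
        obtain ⟨a, b⟩ := acc
        exact PySem.List.foldl_prod_mk
          (fun (d : PySem.Dict Int (List Char)) (c : Int) =>
            d.modify (r - c) [] (fun v => v ++ [pvCell mat r c]))
          (fun (d : PySem.Dict Int (List Char)) (c : Int) =>
            d.modify (r + c) [] (fun v => v ++ [pvCell mat r c])) _ _ _)
  rw [h]
  exact PySem.List.foldl_prod_mk
    (fun (d : PySem.Dict Int (List Char)) (r : Int) => (PySem.List.pyRange 0 cols 1).foldl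
        (fun d c => d.modify (r - c) [] (fun v => v ++ [pvCell mat r c])) d)
    (fun (d : PySem.Dict Int (List Char)) (r : Int) => (PySem.List.pyRange 0 cols 1).foldl
        (fun d c => d.modify (r + c) [] (fun v => v ++ [pvCell mat r c])) d) _ _ _

-- key-list reindexings between A's loop ranges and B's key ranges
theorem pvKeysD_neg (cols : Int) :
    PySem.List.pyRange (-1) (-cols) (-1) = (PySem.List.pyRange 1 cols 1).map (fun c => -c) := by
  rw [PySem.List.pyRange_neg_one, PySem.List.pyRange_one, List.map_map]
  rw [show -1 - -cols = cols - 1 by ring]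
  apply List.map_congr_left
  intro a _
  simp only [Function.comp_apply]
  ring

theorem pvKeysA_shift (rows cols : Int) :
    PySem.List.pyRange cols (rows + cols - 1) 1
      = (PySem.List.pyRange 1 rows 1).map (fun r => r + (cols - 1)) := by
  rw [PySem.List.pyRange_one, PySem.List.pyRange_one, List.map_map]
  rw [show rows + cols - 1 - cols = rows - 1 by ring]
  apply List.map_congr_left
  intro a _
  simp only [Function.comp_apply]
  ring

-- ===== VERDICT (by name: the statement is the Claim_ definition above) =====
theorem create_diagonals_matrix_spec : Claim_equal_create_diagonals_matrix := by
  intro matrix _ hpre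
  unfold Spec_create_diagonals_matrix
  simp only [create_diagonals_matrix, create_diagonals_matrix_alt]
  set rows : Int := (matrix.length : Int) with hrows
  set cols : Int := (((PySem.List.pyGet? matrix 0).getD "").toList.length : Int) with hcols
  set mat : List (List Char) := matrix.map String.toList with hmat
  have hrows1 : 1 ≤ rows := by
    rw [hrows]
    have := List.length_pos_iff.mpr hpre.1
    omega
  have hcols0 : 0 ≤ cols := by rw [hcols]; omega
  rw [PySem.List.foldl_append_singleton_eq_map, PySem.List.foldl_append_singleton_eq_map,
      PySem.List.foldl_append_singleton_eq_map, PySem.List.foldl_append_singleton_eq_map,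
      List.nil_append]
  rw [pvDicts_split mat rows cols, List.map_append]
  rw [PySem.List.pyRange_one_append 0 cols (rows + cols - 1) hcols0 (by omega), List.map_append]
  have hseg1 : (PySem.List.pyRange 0 rows 1).map
        (fun row => String.ofList (pvA_walk mat rows cols 1 1 rows.toNat row 0))
      = (PySem.List.pyRange 0 rows 1).map (fun k => String.ofList
          ((((PySem.List.pyRange 0 rows 1).foldl (fun d r =>
            (PySem.List.pyRange 0 cols 1).foldl
              (fun d c => d.modify (r - c) [] (fun v => v ++ [pvCell mat r c])) d)
            PySem.Dict.empty).getD k []))) := by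
    apply List.map_congr_left
    intro r hr
    rw [PySem.List.mem_pyRange_one] at hr
    have hw := pvA_walk_down mat rows cols r rows.toNat r hr.1 le_rfl (by omega)
    rw [show r - r = (0:Int) by ring] at hw
    rw [pvBucketD, hw]
    conv_rhs => rw [PySem.List.pyRange_one_append 0 r rows hr.1 (by omega)]
    rw [pvSegD_append,
        pvSegD_nil mat cols r (PySem.List.pyRange 0 r 1)
          (fun r' hr' => by rw [PySem.List.mem_pyRange_one] at hr'; omega),
        List.nil_append]
  have hseg2 : (PySem.List.pyRange 1 cols 1).map
        (fun col => String.ofList (pvA_walk mat rows cols 1 1 rows.toNat 0 col))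
      = (PySem.List.pyRange (-1) (-cols) (-1)).map (fun k => String.ofList
          ((((PySem.List.pyRange 0 rows 1).foldl (fun d r =>
            (PySem.List.pyRange 0 cols 1).foldl
              (fun d c => d.modify (r - c) [] (fun v => v ++ [pvCell mat r c])) d)
            PySem.Dict.empty).getD k []))) := by
    rw [pvKeysD_neg, List.map_map]
    apply List.map_congr_left
    intro c hc
    rw [PySem.List.mem_pyRange_one] at hc
    simp only [Function.comp_apply]
    have hw := pvA_walk_down mat rows cols (-c) rows.toNat 0 le_rfl (by omega) (by omega)
    rw [show (0:Int) - -c = c by ring] at hw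
    rw [pvBucketD, hw]
  have hseg3 : (PySem.List.pyRange 0 cols 1).map
        (fun col => String.ofList (pvA_walk mat rows cols 1 (-1) rows.toNat 0 col))
      = (PySem.List.pyRange 0 cols 1).map (fun k => String.ofList
          ((((PySem.List.pyRange 0 rows 1).foldl (fun d r =>
            (PySem.List.pyRange 0 cols 1).foldl
              (fun d c => d.modify (r + c) [] (fun v => v ++ [pvCell mat r c])) d)
            PySem.Dict.empty).getD k []))) := by
    apply List.map_congr_left
    intro c hc
    rw [PySem.List.mem_pyRange_one] at hc
    have hw := pvA_walk_anti mat rows cols c rows.toNat 0 le_rfl (by omega) (by omega)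
    rw [show c - (0:Int) = c by ring] at hw
    rw [pvBucketA, hw]
  have hseg4 : (PySem.List.pyRange 1 rows 1).map
        (fun row => String.ofList (pvA_walk mat rows cols 1 (-1) rows.toNat row (cols - 1)))
      = (PySem.List.pyRange cols (rows + cols - 1) 1).map (fun k => String.ofList
          ((((PySem.List.pyRange 0 rows 1).foldl (fun d r =>
            (PySem.List.pyRange 0 cols 1).foldl
              (fun d c => d.modify (r + c) [] (fun v => v ++ [pvCell mat r c])) d)
            PySem.Dict.empty).getD k []))) := by
    rw [pvKeysA_shift rows cols, List.map_map]
    apply List.map_congr_left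
    intro r hr
    rw [PySem.List.mem_pyRange_one] at hr
    simp only [Function.comp_apply]
    have hw := pvA_walk_anti mat rows cols (r + (cols - 1)) rows.toNat r (by omega) (by omega)
      (by omega)
    rw [show r + (cols - 1) - r = cols - 1 by ring] at hw
    rw [pvBucketA, hw]
    conv_rhs => rw [PySem.List.pyRange_one_append 0 r rows (by omega) (by omega)]
    rw [pvSegA_append,
        pvSegA_nil mat cols (r + (cols - 1)) (PySem.List.pyRange 0 r 1)
          (fun r' hr' => by rw [PySem.List.mem_pyRange_one] at hr'; omega),
        List.nil_append]
  rw [hseg1, hseg2, hseg3, hseg4]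
  simp [List.append_assoc]
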